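-- pv_equiv track=rewrite | github.com/LakshyaG42/IMCProsperityChallenge | round1/Trader.py | values_extract
-- ===== SOURCE A (Python) =====
-- def values_extract(order_dict, buy=0):
--         total_volume = 0
--         best_value = -1
--         max_volume = -1
--
--         for price, volume in order_dict.items():
--             if buy == 0:
--                 volume *= -1
--             total_volume += volume
--             if total_volume > max_volume:
--                 max_volume = total_volume
--                 best_value = price
--
--         return total_volume, best_value
-- ===== SOURCE B (Python) =====
-- def values_extract(order_dict, buy=0):
--     vols = [(-v if buy == 0 else v) for v in order_dict.values()]
--     prefix = []
--     s = 0
--     for v in vols: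
--         s += v
--         prefix.append(s)
--     total = prefix[-1] if prefix else 0
--     best_value = -1
--     if prefix:
--         m = max(prefix)
--         if m > -1:
--             best_value = list(order_dict.keys())[prefix.index(m)]
--     return total, best_value
-- ===== Notes on version B (the rewrite author's own statement) =====
-- stated objective: alternative
-- what changed: Replaces A's single stateful loop (running total + threshold-tracked best) by a two-phase decomposition: build the prefix-sum list of adjusted volumes, take its last element as the total, then use max() and list.index() to pick the price at the first occurrence of the maximum prefix sum when that maximum exceeds -1.
import Mathlib
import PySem

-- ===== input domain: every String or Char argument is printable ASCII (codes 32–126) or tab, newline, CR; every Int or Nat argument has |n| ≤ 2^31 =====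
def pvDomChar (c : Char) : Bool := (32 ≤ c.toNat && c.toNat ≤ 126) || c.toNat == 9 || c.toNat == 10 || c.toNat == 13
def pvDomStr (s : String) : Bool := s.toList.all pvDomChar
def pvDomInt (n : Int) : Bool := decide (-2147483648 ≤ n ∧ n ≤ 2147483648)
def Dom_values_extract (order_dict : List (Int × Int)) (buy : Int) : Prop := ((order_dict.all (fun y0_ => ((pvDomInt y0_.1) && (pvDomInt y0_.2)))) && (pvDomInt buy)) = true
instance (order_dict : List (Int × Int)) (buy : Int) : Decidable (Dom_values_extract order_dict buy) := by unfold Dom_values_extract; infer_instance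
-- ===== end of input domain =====

-- B replaces A's single stateful loop by a two-phase decomposition (prefix-sum list, then max/index); alternative, same cost.

-- ===== PORT A =====
-- A's for-loop over order_dict.items() with state (total_volume, best_value, max_volume).
def pvLoopA (buy : Int) : List (Int × Int) → Int × Int × Int → Int × Int × Int
  | [], st => st
  | pv :: r, st =>
    let volume := if buy == 0 then pv.2 * (-1) else pv.2
    let total := st.1 + volume
    pvLoopA buy r (if total > st.2.2 then (total, pv.1, total) else (total, st.2.1, st.2.2))

def values_extract (order_dict : List (Int × Int)) (buy : Int) : Int × Int :=
  let st := pvLoopA buy order_dict (0, -1, -1)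
  (st.1, st.2.1)

-- ===== PORT B =====
-- Source B's prefix-building loop (s += v; prefix.append(s)).
def pvPrefix (s : Int) : List Int → List Int
  | [] => []
  | v :: r => (s + v) :: pvPrefix (s + v) r

def values_extract_alt (order_dict : List (Int × Int)) (buy : Int) : Int × Int :=
  let vols := order_dict.map (fun pv => if buy == 0 then -pv.2 else pv.2)
  let pfx := pvPrefix 0 vols
  let total := pfx.getLast?.getD 0               -- prefix[-1] if prefix else 0
  let best : Int :=
    match PySem.List.max? pfx (fun x => x) with  -- max(prefix) (none iff prefix == [])
    | none => -1
    | some m =>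
      if m > -1 then
        match PySem.List.index? pfx m with       -- prefix.index(m); always some since m ∈ prefix
        | some i => (order_dict.map Prod.fst).getD i (-1)  -- list(order_dict.keys())[i], i always in range
        | none => -1
      else -1
  (total, best)

-- ===== PRECONDITION & SPEC =====
def Spec_values_extract (order_dict : List (Int × Int)) (buy : Int) (out : Int × Int) : Prop := out = values_extract_alt order_dict buy
instance (order_dict : List (Int × Int)) (buy : Int) (out : Int × Int) : Decidable (Spec_values_extract order_dict buy out) := by unfold Spec_values_extract; infer_instance

-- ===== CLAIM (what is proved, stated in full; the proofs are below) =====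
def Claim_equal_values_extract : Prop := ∀ (order_dict : List (Int × Int)) (buy : Int), Dom_values_extract order_dict buy → Spec_values_extract order_dict buy (values_extract order_dict buy)

-- ===== LEMMAS AND PROOFS =====

-- the value B's "best" computation takes when started from an arbitrary loop state (t, b, m)
def pvBestExpr (buy : Int) (l : List (Int × Int)) (t b m : Int) : Int :=
  match PySem.List.max? (pvPrefix t (l.map (fun pv => if buy == 0 then -pv.2 else pv.2))) (fun x => x) with
  | none => b
  | some M =>
    if M > m then
      match PySem.List.index? (pvPrefix t (l.map (fun pv => if buy == 0 then -pv.2 else pv.2))) M with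
      | some i => (l.map Prod.fst).getD i b
      | none => b
    else b

lemma pv_getLastD_cons (l : List Int) (a d : Int) :
    ((a :: l).getLast?.getD d) = (l.getLast?.getD a) := by
  cases l with
  | nil => simp
  | cons x t =>
    rw [List.getLast?_cons_cons]
    rcases Option.isSome_iff_exists.mp (List.getLast?_isSome.mpr (List.cons_ne_nil x t)) with ⟨y, hy⟩
    rw [hy]; rfl

lemma pv_foldl_max_max (l : List Int) : ∀ (a b : Int),
    List.foldl max (max a b) l = max a (List.foldl max b l) := by
  induction l with
  | nil => intro a b; simp
  | cons x t ih =>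
    intro a b
    simp only [List.foldl_cons]
    rw [max_assoc, ih]

lemma pvPrefix_length (l : List Int) : ∀ s, (pvPrefix s l).length = l.length := by
  induction l with
  | nil => intro s; simp [pvPrefix]
  | cons v r ih => intro s; simp [pvPrefix, ih]

-- pvBestExpr over the empty list is the default b
lemma pvBestExpr_nil (buy t b m : Int) : pvBestExpr buy [] t b m = b := by
  unfold pvBestExpr
  rw [show pvPrefix t (([] : List (Int × Int)).map (fun pv => if buy == 0 then -pv.2 else pv.2)) = [] from rfl,
      (PySem.List.max?_eq_none_iff ([] : List Int) (fun x => x)).mpr rfl]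

-- pvBestExpr over a cons equals pvBestExpr over the tail with A's updated state
lemma pvBestExpr_cons (buy : Int) (pv : Int × Int) (r : List (Int × Int)) (t b m : Int) :
    pvBestExpr buy (pv :: r) t b m
      = (if t + (if buy == 0 then -pv.2 else pv.2) > m
         then pvBestExpr buy r (t + (if buy == 0 then -pv.2 else pv.2)) pv.1
                (t + (if buy == 0 then -pv.2 else pv.2))
         else pvBestExpr buy r (t + (if buy == 0 then -pv.2 else pv.2)) b m) := by
  set v : Int := if buy == 0 then -pv.2 else pv.2 with hv
  set f : Int × Int → Int := fun q => if buy == 0 then -q.2 else q.2 with hf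
  have hmap : (pv :: r).map f = v :: r.map f := by simp [hf, hv]
  cases r with
  | nil =>
    -- prefix = [t+v]; max = t+v, first index 0, price pv.1; tail side is the empty default
    have hm : (PySem.List.max? [t + v] (fun x => x)) = some (t + v) := by
      simpa using PySem.List.max?_id_cons (t + v) ([] : List Int)
    have hnone : (PySem.List.max? ([] : List Int) (fun x => x)) = none :=
      (PySem.List.max?_eq_none_iff ([] : List Int) (fun x => x)).mpr rfl
    have hpre : pvPrefix t ((pv :: ([] : List (Int × Int))).map f) = [t + v] := by
      rw [hmap]; rfl
    unfold pvBestExpr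
    rw [hpre]
    simp only [List.map_nil, pvPrefix, hm, hnone, PySem.List.index?_cons_self,
      List.map_cons, List.getD_cons_zero]
  | cons q rr =>
    have hmapr : (q :: rr).map f = f q :: rr.map f := by simp
    set c : Int := (t + v) + f q with hc
    set Q : List Int := pvPrefix c (rr.map f) with hQ
    have hP' : pvPrefix (t + v) ((q :: rr).map f) = c :: Q := by
      rw [hmapr]; rfl
    set M : Int := Q.foldl max c with hM
    have hmax' : PySem.List.max? (c :: Q) (fun x => x) = some M := PySem.List.max?_id_cons c Q
    have hmax : PySem.List.max? ((t + v) :: c :: Q) (fun x => x) = some (max (t + v) M) := by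
      rw [PySem.List.max?_id_cons]
      congr 1
      show List.foldl max (max (t + v) c) Q = max (t + v) M
      exact pv_foldl_max_max Q (t + v) c
    have hMmem : M ∈ c :: Q := PySem.List.max?_mem hmax'
    obtain ⟨j, hj⟩ : ∃ j, PySem.List.index? (c :: Q) M = some j := by
      rcases h2 : PySem.List.index? (c :: Q) M with _ | j
      · rw [PySem.List.index?_eq_none_iff] at h2; exact absurd hMmem h2
      · exact ⟨j, rfl⟩
    obtain ⟨hjlt, -, -⟩ := PySem.List.getElem_of_index?_eq_some hj
    have hjlt' : j < ((q :: rr).map Prod.fst).length := by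
      have hQl : Q.length = (rr.map f).length := pvPrefix_length (rr.map f) c
      simp only [List.length_cons, List.length_map] at hjlt hQl ⊢
      omega
    have hpre : pvPrefix t ((pv :: q :: rr).map f) = (t + v) :: c :: Q := by
      rw [hmap, show pvPrefix t (v :: (q :: rr).map f)
            = (t + v) :: pvPrefix (t + v) ((q :: rr).map f) from rfl, hP']
    have hget : ∀ d : Int, ((pv :: q :: rr).map Prod.fst).getD (j + 1) d
        = ((q :: rr).map Prod.fst)[j] := by
      intro d
      rw [List.map_cons, List.getD_cons_succ, List.getD_eq_getElem _ _ hjlt']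
    unfold pvBestExpr
    rw [hpre, hP']
    simp only [hmax, hmax', hj]
    by_cases hlt : t + v < M
    case neg =>
      have hle : M ≤ t + v := by omega
      -- head dominates: overall max is t+v at index 0
      rw [max_eq_left hle, PySem.List.index?_cons_self]
      by_cases h1 : t + v > m
      · rw [if_pos h1, if_pos h1, if_neg (by omega : ¬ M > t + v)]
        simp
      · rw [if_neg h1, if_neg h1, if_neg (by omega : ¬ M > m)]
    case pos =>
      -- tail maximum wins: overall max is M at index j+1
      rw [max_eq_right hlt.le,
          PySem.List.index?_cons_of_ne (c :: Q) (by omega : t + v ≠ M)]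
      simp only [hj, Option.map_some]
      by_cases h1 : t + v > m
      · rw [if_pos h1, if_pos (by omega : M > m), if_pos hlt]
        rw [hget b, List.getD_eq_getElem _ _ hjlt']
      · rw [if_neg h1]
        by_cases h2 : M > m
        · rw [if_pos h2, if_pos h2]
          rw [hget b, List.getD_eq_getElem _ _ hjlt']
        · rw [if_neg h2, if_neg h2]

theorem pvLoopA_eq (buy : Int) : ∀ (l : List (Int × Int)) (t b m : Int),
    (pvLoopA buy l (t, b, m)).1
      = (pvPrefix t (l.map (fun pv => if buy == 0 then -pv.2 else pv.2))).getLast?.getD t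
    ∧ (pvLoopA buy l (t, b, m)).2.1 = pvBestExpr buy l t b m := by
  intro l
  induction l with
  | nil =>
    intro t b m
    constructor
    · simp [pvLoopA, pvPrefix]
    · rw [pvBestExpr_nil]; rfl
  | cons pv r ih =>
    intro t b m
    have hvol : (if buy == 0 then pv.2 * (-1) else pv.2)
        = (if buy == 0 then -pv.2 else pv.2) := by split <;> ring
    set v : Int := if buy == 0 then -pv.2 else pv.2 with hv
    have hstep : pvLoopA buy (pv :: r) (t, b, m)
        = pvLoopA buy r (if t + v > m then (t + v, pv.1, t + v) else (t + v, b, m)) := by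
      show pvLoopA buy r _ = _
      rw [hvol]
    have hpre : pvPrefix t ((pv :: r).map (fun q => if buy == 0 then -q.2 else q.2))
        = (t + v) :: pvPrefix (t + v) (r.map (fun q => if buy == 0 then -q.2 else q.2)) := by
      simp only [List.map_cons, pvPrefix, hv]
    constructor
    · rw [hstep, hpre, pv_getLastD_cons]
      split
      · exact (ih (t + v) pv.1 (t + v)).1
      · exact (ih (t + v) b m).1
    · rw [hstep, pvBestExpr_cons]
      show _ = if t + v > m then _ else _
      split
      · exact (ih (t + v) pv.1 (t + v)).2
      · exact (ih (t + v) b m).2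

-- ===== VERDICT (by name: the statement is the Claim_ definition above) =====
theorem values_extract_spec : Claim_equal_values_extract := by
  intro od buy _
  unfold Spec_values_extract values_extract values_extract_alt
  obtain ⟨h1, h2⟩ := pvLoopA_eq buy od 0 (-1) (-1)
  simp only [h1, h2, pvBestExpr]
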